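-- pv_equiv track=rewrite | github.com/paulscherrerinstitute/sf_daq_broker | sf_daq_broker/detector/detector_config.py | configured_detectors_for_beamline
-- ===== SOURCE A (Python) =====
-- _daq_beamline = {
--     3  : {0: "alvra",   1: "bernina"},
--     8  : {0: "alvra",   1: "cristallina"},
--     9  : {0: "maloja",  1: "furka"},
--     10 : {0: "bernina", 1: "cristallina"},
--     12 : {0: "alvra",   1: "bernina"},
--     13 : {0: "alvra",   1: "bernina"}
-- }
--
-- _detector_daq = {
--     "JF01T03V01" : { "daq" : 12, "port": 1},
--     "JF02T09V03" : { "daq" : 12, "port": 0},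
--     "JF03T01V02" : { "daq" : 12, "port": 1},
--     "JF04T01V01" : { "daq" : 12, "port": 1},
--     "JF05T01V01" : { "daq" : 12, "port": 1},
--     "JF06T08V04" : { "daq" : 13, "port": 0},
--     "JF06T32V04" : { "daq" : 12, "port": 0},
--     "JF07T32V02" : { "daq" : 13, "port": 1},
--     "JF08T01V01" : { "daq" : 13, "port": 0},
--     "JF09T01V01" : { "daq" : 13, "port": 0},
--     "JF10T01V01" : { "daq" : 13, "port": 0},
--     "JF11T04V01" : { "daq" : 13, "port": 0},
--     "JF13T01V01" : { "daq" : 13, "port": 1},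
--     "JF14T01V01" : { "daq" : 13, "port": 1},
--     "JF15T08V01" : { "daq" : 9,  "port": 0},
--     "JF16T03V01" : { "daq" : 10, "port": 1},
--     "JF17T16V01" : { "daq" : 10, "port": 1},
--     "JF18T01V01" : { "daq" : 9,  "port": 1}
-- }
--
-- def configured_detectors_for_beamline(beamline=None):
--     detectors = []
--     if beamline is None:
--         return detectors
--
--     for detector_name in _detector_daq:
--         daq = _detector_daq[detector_name]["daq"]
--         port = _detector_daq[detector_name]["port"]
--         if daq in _daq_beamline and port in _daq_beamline[daq]:
--             if _daq_beamline[daq][port] == beamline: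
--                 detectors.append(detector_name)
--
--     return detectors
-- ===== SOURCE B (Python) =====
-- _daq_beamline = {
--     3  : {0: "alvra",   1: "bernina"},
--     8  : {0: "alvra",   1: "cristallina"},
--     9  : {0: "maloja",  1: "furka"},
--     10 : {0: "bernina", 1: "cristallina"},
--     12 : {0: "alvra",   1: "bernina"},
--     13 : {0: "alvra",   1: "bernina"}
-- }
--
-- _detector_daq = {
--     "JF01T03V01" : { "daq" : 12, "port": 1},
--     "JF02T09V03" : { "daq" : 12, "port": 0},
--     "JF03T01V02" : { "daq" : 12, "port": 1},
--     "JF04T01V01" : { "daq" : 12, "port": 1},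
--     "JF05T01V01" : { "daq" : 12, "port": 1},
--     "JF06T08V04" : { "daq" : 13, "port": 0},
--     "JF06T32V04" : { "daq" : 12, "port": 0},
--     "JF07T32V02" : { "daq" : 13, "port": 1},
--     "JF08T01V01" : { "daq" : 13, "port": 0},
--     "JF09T01V01" : { "daq" : 13, "port": 0},
--     "JF10T01V01" : { "daq" : 13, "port": 0},
--     "JF11T04V01" : { "daq" : 13, "port": 0},
--     "JF13T01V01" : { "daq" : 13, "port": 1},
--     "JF14T01V01" : { "daq" : 13, "port": 1},
--     "JF15T08V01" : { "daq" : 9,  "port": 0},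
--     "JF16T03V01" : { "daq" : 10, "port": 1},
--     "JF17T16V01" : { "daq" : 10, "port": 1},
--     "JF18T01V01" : { "daq" : 9,  "port": 1}
-- }
--
-- # Flattened module tables (built once): every (daq, port, beamline) triple, and
-- # every (detector, daq, port) triple in _detector_daq insertion order.
-- _port_names = [(daq, port, name)
--                for daq, ports in _daq_beamline.items()
--                for port, name in ports.items()]
-- _detector_table = [(name, cfg["daq"], cfg["port"])
--                    for name, cfg in _detector_daq.items()]
--
--
-- def configured_detectors_for_beamline(beamline=None):
--     # (daq, port) endpoints serving this beamline; empty for None (no name is None),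
--     # so the None case needs no special branch.
--     wanted = {(d, p) for d, p, n in _port_names if n == beamline}
--     return [name for name, d, p in _detector_table if (d, p) in wanted]
-- ===== Notes on version B (the rewrite author's own statement) =====
-- stated objective: alternative
-- what changed: Instead of A's per-detector loop resolving daq/port through nested dict lookups with containment guards, B flattens both module dicts once into triple tables, computes the set of (daq, port) endpoints serving the beamline, and filters the detector table by set membership; the None branch and the containment guards disappear.
import Mathlib
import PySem

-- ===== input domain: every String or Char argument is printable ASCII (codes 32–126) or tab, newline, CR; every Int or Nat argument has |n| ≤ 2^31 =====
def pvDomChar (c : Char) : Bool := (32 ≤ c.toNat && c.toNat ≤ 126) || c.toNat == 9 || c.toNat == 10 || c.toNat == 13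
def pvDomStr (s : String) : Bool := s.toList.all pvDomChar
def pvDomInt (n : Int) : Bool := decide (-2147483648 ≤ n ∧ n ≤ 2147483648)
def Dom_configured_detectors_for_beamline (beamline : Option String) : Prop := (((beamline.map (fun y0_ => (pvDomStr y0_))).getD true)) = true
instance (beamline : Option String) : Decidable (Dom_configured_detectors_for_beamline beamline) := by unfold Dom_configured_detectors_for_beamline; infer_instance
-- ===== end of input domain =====

-- B replaces A's per-detector loop (nested dict lookups + containment guards) by
-- flattened triple tables: it computes the set of (daq, port) endpoints serving the
-- beamline, then filters the detector table by set membership; objective: alternative.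


-- ===== PORT A =====
-- module constant _daq_beamline (dict literal, insertion order)
def pvDaqBeamline : PySem.Dict Int (PySem.Dict Int String) :=
  PySem.Dict.mk [
    (3, PySem.Dict.mk [(0, "alvra"), (1, "bernina")]),
    (8, PySem.Dict.mk [(0, "alvra"), (1, "cristallina")]),
    (9, PySem.Dict.mk [(0, "maloja"), (1, "furka")]),
    (10, PySem.Dict.mk [(0, "bernina"), (1, "cristallina")]),
    (12, PySem.Dict.mk [(0, "alvra"), (1, "bernina")]),
    (13, PySem.Dict.mk [(0, "alvra"), (1, "bernina")])]

-- module constant _detector_daq (dict literal, insertion order)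
def pvDetectorDaq : PySem.Dict String (PySem.Dict String Int) :=
  PySem.Dict.mk [
    ("JF01T03V01", PySem.Dict.mk [("daq", 12), ("port", 1)]),
    ("JF02T09V03", PySem.Dict.mk [("daq", 12), ("port", 0)]),
    ("JF03T01V02", PySem.Dict.mk [("daq", 12), ("port", 1)]),
    ("JF04T01V01", PySem.Dict.mk [("daq", 12), ("port", 1)]),
    ("JF05T01V01", PySem.Dict.mk [("daq", 12), ("port", 1)]),
    ("JF06T08V04", PySem.Dict.mk [("daq", 13), ("port", 0)]),
    ("JF06T32V04", PySem.Dict.mk [("daq", 12), ("port", 0)]),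
    ("JF07T32V02", PySem.Dict.mk [("daq", 13), ("port", 1)]),
    ("JF08T01V01", PySem.Dict.mk [("daq", 13), ("port", 0)]),
    ("JF09T01V01", PySem.Dict.mk [("daq", 13), ("port", 0)]),
    ("JF10T01V01", PySem.Dict.mk [("daq", 13), ("port", 0)]),
    ("JF11T04V01", PySem.Dict.mk [("daq", 13), ("port", 0)]),
    ("JF13T01V01", PySem.Dict.mk [("daq", 13), ("port", 1)]),
    ("JF14T01V01", PySem.Dict.mk [("daq", 13), ("port", 1)]),
    ("JF15T08V01", PySem.Dict.mk [("daq", 9), ("port", 0)]),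
    ("JF16T03V01", PySem.Dict.mk [("daq", 10), ("port", 1)]),
    ("JF17T16V01", PySem.Dict.mk [("daq", 10), ("port", 1)]),
    ("JF18T01V01", PySem.Dict.mk [("daq", 9), ("port", 1)])]

-- literal port of A: early return on None, then a loop over the detector names
-- appending those whose resolved beamline equals `beamline`.
-- (the `getD` defaults are never hit: every looked-up key is present in the constants)
def configured_detectors_for_beamline (beamline : Option String) : List String :=
  let detectors : List String := []
  match beamline with
  | none => detectors
  | some b =>
    pvDetectorDaq.keys.foldl (fun detectors detector_name =>
      let daq := (pvDetectorDaq.getD detector_name PySem.Dict.empty).getD "daq" 0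
      let port := (pvDetectorDaq.getD detector_name PySem.Dict.empty).getD "port" 0
      if pvDaqBeamline.contains daq && (pvDaqBeamline.getD daq PySem.Dict.empty).contains port then
        if (pvDaqBeamline.getD daq PySem.Dict.empty).getD port "" == b then
          detectors ++ [detector_name]
        else detectors
      else detectors) detectors

-- ===== PORT B =====
-- Source B's module tables, precomputed once at module scope: _port_names is the
-- flattening of _daq_beamline into (daq, port, beamline-name) triples and
-- _detector_table the flattening of _detector_daq into (name, daq, port)
-- triples, both in insertion order; written here as their literal values.
def pvPortNames : List (Int × Int × String) :=
  [(3, 0, "alvra"), (3, 1, "bernina"),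
   (8, 0, "alvra"), (8, 1, "cristallina"),
   (9, 0, "maloja"), (9, 1, "furka"),
   (10, 0, "bernina"), (10, 1, "cristallina"),
   (12, 0, "alvra"), (12, 1, "bernina"),
   (13, 0, "alvra"), (13, 1, "bernina")]

def pvDetectorTable : List (String × Int × Int) :=
  [("JF01T03V01", 12, 1), ("JF02T09V03", 12, 0), ("JF03T01V02", 12, 1),
   ("JF04T01V01", 12, 1), ("JF05T01V01", 12, 1), ("JF06T08V04", 13, 0),
   ("JF06T32V04", 12, 0), ("JF07T32V02", 13, 1), ("JF08T01V01", 13, 0),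
   ("JF09T01V01", 13, 0), ("JF10T01V01", 13, 0), ("JF11T04V01", 13, 0),
   ("JF13T01V01", 13, 1), ("JF14T01V01", 13, 1), ("JF15T08V01", 9, 0),
   ("JF16T03V01", 10, 1), ("JF17T16V01", 10, 1), ("JF18T01V01", 9, 1)]

-- literal port of B: a set comprehension over the endpoint table (n == beamline,
-- where beamline may be None) followed by a membership filter over the detector
-- table.  The set is only tested for membership, never iterated.
def configured_detectors_for_beamline_alt (beamline : Option String) : List String :=
  let wanted : PySem.Set (Int × Int) :=
    PySem.Set.ofList ((pvPortNames.filter (fun t => some t.2.2 == beamline)).map (fun t => (t.1, t.2.1)))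
  (pvDetectorTable.filter (fun t => wanted.contains (t.2.1, t.2.2))).map (fun t => t.1)

-- ===== PRECONDITION & SPEC =====
def Spec_configured_detectors_for_beamline (beamline : Option String) (out : List String) : Prop := out = configured_detectors_for_beamline_alt beamline
instance (beamline : Option String) (out : List String) : Decidable (Spec_configured_detectors_for_beamline beamline out) := by unfold Spec_configured_detectors_for_beamline; infer_instance

-- ===== CLAIM (what is proved, stated in full; the proofs are below) =====
def Claim_equal_configured_detectors_for_beamline : Prop := ∀ (beamline : Option String), Dom_configured_detectors_for_beamline beamline → Spec_configured_detectors_for_beamline beamline (configured_detectors_for_beamline beamline)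

-- ===== LEMMAS AND PROOFS =====

-- ===== VERDICT (by name: the statement is the Claim_ definition above) =====
theorem configured_detectors_for_beamline_spec : Claim_equal_configured_detectors_for_beamline := by
  intro beamline _
  unfold Spec_configured_detectors_for_beamline
  match beamline with
  | none => decide
  | some b =>
    by_cases h1 : b = "alvra"; · subst h1; decide
    by_cases h2 : b = "bernina"; · subst h2; decide
    by_cases h3 : b = "cristallina"; · subst h3; decide
    by_cases h4 : b = "maloja"; · subst h4; decide
    by_cases h5 : b = "furka"; · subst h5; decide
    -- b names no configured beamline: A's loop appends nothing, B's endpoint set is empty.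
    have e1 : ("alvra" == b) = false := beq_eq_false_iff_ne.mpr (Ne.symm h1)
    have e2 : ("bernina" == b) = false := beq_eq_false_iff_ne.mpr (Ne.symm h2)
    have e3 : ("cristallina" == b) = false := beq_eq_false_iff_ne.mpr (Ne.symm h3)
    have e4 : ("maloja" == b) = false := beq_eq_false_iff_ne.mpr (Ne.symm h4)
    have e5 : ("furka" == b) = false := beq_eq_false_iff_ne.mpr (Ne.symm h5)
    simp only [configured_detectors_for_beamline, configured_detectors_for_beamline_alt]
    simp [PySem.Dict.getD_eq_get?_getD, e1, e2, e3, e4, e5, Ne.symm h1, Ne.symm h2, Ne.symm h3, Ne.symm h4, Ne.symm h5,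
      PySem.Dict.keys, pvDetectorDaq, pvDaqBeamline, pvPortNames, pvDetectorTable,
      PySem.Dict.contains_mk, List.foldl, List.filter, PySem.Set.ofList, PySem.Set.contains,
      PySem.Dict.getD, PySem.Dict.get?, PySem.Dict.contains, PySem.Dict.empty]
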